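-- pv_equiv track=rewrite | github.com/ksomemo/Competitive-programming | atcoder/abc/108/A.py | AC
-- ===== SOURCE A (Python) =====
-- def AC(K):
--     d = {}
--     for i in range(1, K+1):
--         for j in range(i+1, K+1):
--             p = tuple(sorted((i, j)))
--             if i % 2 == 1 and j % 2 == 0:
--                 d[p] = 1
--             elif i % 2 == 0 and j % 2 == 1:
--                 d[p] = 1
--
--     ans = len(d)
--     return ans
-- ===== SOURCE B (Python) =====
-- def AC(K):
--     n = max(K, 0)
--     evens = n // 2
--     return evens * (n - evens)
-- ===== Notes on version B (the rewrite author's own statement) =====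
-- stated objective: faster
-- what changed: Replaced the O(K^2) nested-loop dict construction with the closed-form product of the count of evens and the count of odds in 1..K.
import Mathlib
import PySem

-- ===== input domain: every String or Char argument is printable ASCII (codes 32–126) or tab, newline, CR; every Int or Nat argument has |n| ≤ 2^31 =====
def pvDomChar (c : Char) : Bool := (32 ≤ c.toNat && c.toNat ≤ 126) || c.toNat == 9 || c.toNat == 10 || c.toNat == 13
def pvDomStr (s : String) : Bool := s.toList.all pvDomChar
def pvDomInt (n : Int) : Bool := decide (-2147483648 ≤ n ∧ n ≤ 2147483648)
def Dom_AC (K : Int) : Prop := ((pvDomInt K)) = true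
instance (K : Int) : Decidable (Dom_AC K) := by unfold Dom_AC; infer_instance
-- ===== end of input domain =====

-- B replaces A's O(K^2) dict-building double loop by the closed-form product evens * odds.

-- ===== PORT A =====
-- inner loop 'for j in range(i+1, K+1): …' of A, acting on the dict d;
-- 'p = tuple(sorted((i, j)))' on a 2-tuple is exactly 'if i ≤ j then (i, j) else (j, i)'
def AC_inner (K i : Int) (d : PySem.Dict (Int × Int) Int) : PySem.Dict (Int × Int) Int :=
  (PySem.List.pyRange (i+1) (K+1) 1).foldl (fun d j =>
    let p := if i ≤ j then (i, j) else (j, i)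
    if PySem.Int.mod i 2 == 1 && PySem.Int.mod j 2 == 0 then d.insert p 1
    else if PySem.Int.mod i 2 == 0 && PySem.Int.mod j 2 == 1 then d.insert p 1
    else d) d

def AC (K : Int) : Int :=
  let d := (PySem.List.pyRange 1 (K+1) 1).foldl (fun d i => AC_inner K i d) PySem.Dict.empty
  (d.size : Int)

-- ===== PORT B =====
def AC_alt (K : Int) : Int :=
  let n := max K 0
  let evens := PySem.Int.floordiv n 2
  evens * (n - evens)

-- ===== PRECONDITION & SPEC =====
def Spec_AC (K : Int) (out : Int) : Prop := out = AC_alt K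
instance (K : Int) (out : Int) : Decidable (Spec_AC K out) := by unfold Spec_AC; infer_instance

-- ===== CLAIM (what is proved, stated in full; the proofs are below) =====
def Claim_equal_AC : Prop := ∀ (K : Int), Dom_AC K → Spec_AC K (AC K)

-- ===== LEMMAS AND PROOFS =====

-- the parity test A's two branches perform, as one boolean
def oppPar (i j : Int) : Bool :=
  (PySem.Int.mod i 2 == 1 && PySem.Int.mod j 2 == 0) ||
  (PySem.Int.mod i 2 == 0 && PySem.Int.mod j 2 == 1)

lemma oppPar_iff (i j : Int) : oppPar i j = true ↔ ¬ (2 ∣ (i + j)) := by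
  rw [Int.dvd_iff_emod_eq_zero]; simp [oppPar]; omega

-- items after the inner loop: the fresh keys (i, j) for qualifying j are appended
lemma AC_inner_items (K i : Int) (d : PySem.Dict (Int × Int) Int)
    (hfresh : ∀ j, d.contains (i, j) = false) :
    (AC_inner K i d).items
      = d.items ++ ((PySem.List.pyRange (i+1) (K+1) 1).filter (oppPar i)).map
          (fun j => ((i, j), (1 : Int))) := by
  unfold AC_inner
  have heq := PySem.List.foldl_congr_mem
      (l := PySem.List.pyRange (i+1) (K+1) 1) (init := d)
      (f := fun (d : PySem.Dict (Int × Int) Int) (j : Int) =>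
        let p := if i ≤ j then (i, j) else (j, i)
        if PySem.Int.mod i 2 == 1 && PySem.Int.mod j 2 == 0 then d.insert p 1
        else if PySem.Int.mod i 2 == 0 && PySem.Int.mod j 2 == 1 then d.insert p 1
        else d)
      (g := fun d j => if oppPar i j then d.insert (i, j) 1 else d)
      (by
        intro acc j hj
        have hij : i + 1 ≤ j := ((PySem.List.mem_pyRange_one).mp hj).1
        have : i ≤ j := by omega
        simp only [this, if_pos]
        unfold oppPar
        cases h1 : (PySem.Int.mod i 2 == 1 && PySem.Int.mod j 2 == 0) <;>
          cases h2 : (PySem.Int.mod i 2 == 0 && PySem.Int.mod j 2 == 1) <;> simp)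
  rw [heq, PySem.List.foldl_if_eq_foldl_filter]
  exact PySem.Dict.items_foldl_insert_fresh
      (l := (PySem.List.pyRange (i+1) (K+1) 1).filter (oppPar i))
      (k := fun j => (i, j)) (v := fun _ => (1 : Int)) (d := d)
      (by intro a _; exact hfresh a)
      (by
        refine List.Nodup.map ?_ ((PySem.List.nodup_pyRange_one _ _).filter _)
        intro a b h; simpa using h)

-- number of opposite-parity j in (i, i+n]
lemma filter_oppPar_length (i : Int) (n : Nat) :
    ((PySem.List.pyRange (i+1) (i+1+n) 1).filter (oppPar i)).length = (n+1)/2 := by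
  induction n with
  | zero => simp
  | succ n ih =>
    have h : (i+1+(n+1:Nat)) = (i+1+n) + 1 := by push_cast; ring
    rw [h, PySem.List.pyRange_one_succ_right (by omega), List.filter_append, List.length_append, ih]
    by_cases hp : oppPar i (i+1+n) = true
    · have hodd : ¬ (2 ∣ (i + (i+1+n))) := (oppPar_iff _ _).mp hp
      have : n % 2 = 0 := by omega
      simp [hp]; omega
    · have : (2 ∣ (i + (i+1+n))) := by
        by_contra hc; exact hp ((oppPar_iff _ _).mpr hc)
      have : n % 2 = 1 := by omega
      simp [hp]; omega

def pairCount (n : Nat) : Nat := (n/2) * ((n+1)/2)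

lemma pairCount_succ (n : Nat) : pairCount (n+1) = pairCount n + (n+1)/2 := by
  unfold pairCount
  obtain ⟨m, rfl | rfl⟩ := Nat.even_or_odd' n <;> ·
    have h1 : (2*m)/2 = m := by omega
    have h2 : (2*m+1)/2 = m := by omega
    have h3 : (2*m+2)/2 = m+1 := by omega
    have h5 : (2*m+1+1+1)/2 = m+1 := by omega
    simp [h1, h2, h3, h5]; ring

lemma outer_loop (K : Int) (n : Nat) (a : Int) (d : PySem.Dict (Int × Int) Int)
    (ha : K + 1 - a = n)
    (hd : ∀ i j : Int, a ≤ i → d.contains (i, j) = false) :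
    ((PySem.List.pyRange a (K+1) 1).foldl (fun d i => AC_inner K i d) d).size
      = d.size + pairCount n := by
  induction n generalizing a d with
  | zero =>
    rw [PySem.List.pyRange_one_eq_nil (by omega)]
    simp [pairCount]
  | succ n ih =>
    rw [PySem.List.pyRange_one_cons (by omega), List.foldl_cons]
    have hitems := AC_inner_items K a d (fun j => hd a j le_rfl)
    have hsize : (AC_inner K a d).size = d.size + (n+1)/2 := by
      show (AC_inner K a d).items.length = d.items.length + (n+1)/2
      rw [hitems, List.length_append, List.length_map]
      have hK : K + 1 = a + 1 + (n : Int) := by omega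
      rw [hK, filter_oppPar_length]
    have hd' : ∀ i j : Int, a + 1 ≤ i → (AC_inner K a d).contains (i, j) = false := by
      intro i j hi
      rw [Bool.eq_false_iff]
      intro hc
      rw [PySem.Dict.contains_iff_mem_keys] at hc
      simp only [PySem.Dict.keys, hitems, List.map_append, List.mem_append, List.map_map,
        List.mem_map] at hc
      rcases hc with hc | ⟨j', _, hj'⟩
      · have : d.contains (i, j) = true :=
          (PySem.Dict.contains_iff_mem_keys _ _).mpr (by simpa [PySem.Dict.keys] using hc)
        rw [hd i j (by omega)] at this; exact Bool.false_ne_true this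
      · cases hj'; omega
    rw [ih (a + 1) (AC_inner K a d) (by omega) hd', hsize, pairCount_succ]
    omega

-- ===== VERDICT (by name: the statement is the Claim_ definition above) =====
theorem AC_spec : Claim_equal_AC := by
  intro K _
  unfold Spec_AC AC AC_alt
  by_cases hK : 0 ≤ K
  · have hm : K = (K.toNat : Int) := by omega
    have h := outer_loop K K.toNat 1 PySem.Dict.empty (by omega)
      (by intro i j _; exact PySem.Dict.contains_empty _)
    simp only [h, PySem.Dict.size_empty, Nat.zero_add]
    have hmax : max K 0 = (K.toNat : Int) := by omega
    rw [hmax, PySem.Int.floordiv_eq_ediv_of_pos (by norm_num : (0:Int) < 2)]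
    have h1 : ((K.toNat / 2 : Nat) : Int) = (K.toNat : Int) / 2 := by omega
    have h2 : (((K.toNat + 1) / 2 : Nat) : Int) = (K.toNat : Int) - (K.toNat : Int) / 2 := by omega
    rw [pairCount, Nat.cast_mul, h1, h2]
  · rw [PySem.List.pyRange_one_eq_nil (by omega)]
    have hmax : max K 0 = 0 := by omega
    simp [hmax, PySem.Int.floordiv]
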